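-- pv_equiv track=rewrite | github.com/dzbarts/excel-loader | dags/manual_excel_loader/validation_report.py | _rows_to_ranges
-- ===== SOURCE A (Python) =====
-- def _rows_to_ranges(rows: list[int], max_ranges: int = 10) -> str:
--     """Преобразует список строк в компактное строковое представление диапазонов.
--
--     Пример: [1,2,3,5,6,8] → '1–3, 5–6, 8'
--     Если диапазонов больше max_ranges — обрезает и добавляет '… and N more rows'.
--     """
--     sorted_rows = sorted(set(rows))
--     if not sorted_rows:
--         return ""
--
--     # Строим список диапазонов (start, end)
--     ranges: list[tuple[int, int]] = []
--     start = end = sorted_rows[0]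
--     for r in sorted_rows[1:]:
--         if r == end + 1:
--             end = r
--         else:
--             ranges.append((start, end))
--             start = end = r
--     ranges.append((start, end))
--
--     visible = ranges[:max_ranges]
--     parts = [str(s) if s == e else f"{s}–{e}" for s, e in visible]
--     result = ", ".join(parts)
--
--     if len(ranges) > max_ranges:
--         extra_count = sum(e - s + 1 for s, e in ranges[max_ranges:])
--         result += f" … and {extra_count} more rows"
--
--     return result
-- ===== SOURCE B (Python) =====
-- def _rows_to_ranges(rows: list[int], max_ranges: int = 10) -> str:
--     s = sorted(set(rows))
--     if not s:
--         return ""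
--     # boundary detection: a value starts a run iff its predecessor is not value-1,
--     # ends a run iff its successor is not value+1; zip the two boundary lists.
--     starts = [v for p, v in zip([None] + [x for x in s], s) if p is None or p != v - 1]
--     ends = [v for v, n in zip(s, [x for x in s[1:]] + [None]) if n is None or n != v + 1]
--     ranges = list(zip(starts, ends))
--
--     visible = ranges[:max_ranges]
--     parts = [str(a) if a == b else f"{a}–{b}" for a, b in visible]
--     result = ", ".join(parts)
--
--     if len(ranges) > max_ranges:
--         extra_count = sum(b - a + 1 for a, b in ranges[max_ranges:])
--         result += f" … and {extra_count} more rows"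
--
--     return result
-- ===== Notes on version B (the rewrite author's own statement) =====
-- stated objective: alternative
-- what changed: Replaces A's stateful accumulator loop (carrying start/end and appending on breaks) with declarative boundary detection: run starts and run ends are picked by filtering two shifted zips of the sorted deduplicated list and zipped together.
import Mathlib
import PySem

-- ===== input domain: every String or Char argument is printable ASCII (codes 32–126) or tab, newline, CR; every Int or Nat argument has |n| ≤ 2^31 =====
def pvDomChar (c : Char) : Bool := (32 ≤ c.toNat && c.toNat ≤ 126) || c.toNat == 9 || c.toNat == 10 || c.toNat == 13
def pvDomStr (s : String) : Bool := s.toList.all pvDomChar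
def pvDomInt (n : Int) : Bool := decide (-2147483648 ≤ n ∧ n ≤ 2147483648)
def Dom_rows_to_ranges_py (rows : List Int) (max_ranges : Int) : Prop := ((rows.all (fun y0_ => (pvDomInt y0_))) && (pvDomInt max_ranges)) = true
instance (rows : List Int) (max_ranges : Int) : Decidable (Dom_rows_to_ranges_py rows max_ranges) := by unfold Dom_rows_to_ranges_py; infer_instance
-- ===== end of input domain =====

-- B replaces A's stateful accumulator loop with boundary detection via shifted zips (alternative decomposition, same cost).

-- ===== PORT A =====
def rows_to_ranges_py (rows : List Int) (max_ranges : Int) : String :=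
  let sorted_rows := PySem.List.sorted (PySem.Set.ofList rows) (fun x => x) false
  match sorted_rows with
  | [] => ""
  | r0 :: rest =>
    let st := rest.foldl
      (fun (acc : List (Int × Int) × Int × Int) r =>
        if r = acc.2.2 + 1 then (acc.1, acc.2.1, r)
        else (acc.1 ++ [(acc.2.1, acc.2.2)], r, r))
      ([], r0, r0)
    let ranges := st.1 ++ [(st.2.1, st.2.2)]
    let visible := PySem.List.slice ranges none (some max_ranges)
    let parts := visible.map (fun p =>
      if p.1 = p.2 then PySem.Int.toStr p.1
      else PySem.Int.toStr p.1 ++ "–" ++ PySem.Int.toStr p.2)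
    let result := PySem.Str.join ", " parts
    if (ranges.length : Int) > max_ranges then
      result ++ " … and " ++
        PySem.Int.toStr (((PySem.List.slice ranges (some max_ranges) none).map
          (fun p => p.2 - p.1 + 1)).sum) ++ " more rows"
    else result

-- ===== PORT B =====
-- run starts: values whose predecessor (shifted zip, None-padded) is not v-1
def pvStarts (s : List Int) : List Int :=
  (((none :: s.map some).zip s).filter
    (fun pv => pv.1.elim true (fun p => decide (p ≠ pv.2 - 1)))).map (·.2)

-- run ends: values whose successor (shifted zip, None-padded) is not v+1
def pvEnds (s : List Int) : List Int :=
  ((s.zip (s.tail.map some ++ [none])).filter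
    (fun vn => vn.2.elim true (fun n => decide (n ≠ vn.1 + 1)))).map (·.1)

def rows_to_ranges_py_alt (rows : List Int) (max_ranges : Int) : String :=
  let s := PySem.List.sorted (PySem.Set.ofList rows) (fun x => x) false
  match s with
  | [] => ""
  | _ =>
    let ranges := (pvStarts s).zip (pvEnds s)
    let visible := PySem.List.slice ranges none (some max_ranges)
    let parts := visible.map (fun p =>
      if p.1 = p.2 then PySem.Int.toStr p.1
      else PySem.Int.toStr p.1 ++ "–" ++ PySem.Int.toStr p.2)
    let result := PySem.Str.join ", " parts
    if (ranges.length : Int) > max_ranges then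
      result ++ " … and " ++
        PySem.Int.toStr (((PySem.List.slice ranges (some max_ranges) none).map
          (fun p => p.2 - p.1 + 1)).sum) ++ " more rows"
    else result

-- ===== PRECONDITION & SPEC =====
def Spec_rows_to_ranges_py (rows : List Int) (max_ranges : Int) (out : String) : Prop := out = rows_to_ranges_py_alt rows max_ranges
instance (rows : List Int) (max_ranges : Int) (out : String) : Decidable (Spec_rows_to_ranges_py rows max_ranges out) := by unfold Spec_rows_to_ranges_py; infer_instance

-- ===== CLAIM (what is proved, stated in full; the proofs are below) =====
def Claim_equal_rows_to_ranges_py : Prop := ∀ (rows : List Int) (max_ranges : Int), Dom_rows_to_ranges_py rows max_ranges → Spec_rows_to_ranges_py rows max_ranges (rows_to_ranges_py rows max_ranges)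

-- ===== LEMMAS AND PROOFS =====

-- canonical run list: A's loop distilled (proof helper only)
def pvRuns (a p : Int) (rs : List Int) : List (Int × Int) :=
  match rs with
  | [] => [(a, p)]
  | r :: rs => if r = p + 1 then pvRuns a r rs else (a, p) :: pvRuns r r rs

theorem foldA_eq_runs (rs : List Int) (acc : List (Int × Int)) (a p : Int) :
    (let st := rs.foldl
      (fun (acc : List (Int × Int) × Int × Int) r =>
        if r = acc.2.2 + 1 then (acc.1, acc.2.1, r)
        else (acc.1 ++ [(acc.2.1, acc.2.2)], r, r))
      (acc, a, p)
     st.1 ++ [(st.2.1, st.2.2)]) = acc ++ pvRuns a p rs := by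
  induction rs generalizing acc a p with
  | nil => simp [pvRuns]
  | cons r rs ih =>
    by_cases h : r = p + 1 <;> simp [List.foldl_cons, pvRuns, h, ih, List.append_assoc]

def pvStartsTail (p : Int) (rs : List Int) : List Int :=
  (((some p :: rs.map some).zip rs).filter
    (fun pv => pv.1.elim true (fun q => decide (q ≠ pv.2 - 1)))).map (·.2)

def pvEndsTail (p : Int) (rs : List Int) : List Int :=
  (((p :: rs).zip (rs.map some ++ [none])).filter
    (fun vn => vn.2.elim true (fun n => decide (n ≠ vn.1 + 1)))).map (·.1)

theorem pvStarts_cons (r0 : Int) (rs : List Int) :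
    pvStarts (r0 :: rs) = r0 :: pvStartsTail r0 rs := by
  simp [pvStarts, pvStartsTail]

theorem pvEnds_cons (r0 : Int) (rs : List Int) :
    pvEnds (r0 :: rs) = pvEndsTail r0 rs := by
  simp [pvEnds, pvEndsTail]

theorem zip_tails_eq_runs (rs : List Int) (p a : Int) :
    (a :: pvStartsTail p rs).zip (pvEndsTail p rs) = pvRuns a p rs := by
  induction rs generalizing p a with
  | nil => simp [pvStartsTail, pvEndsTail, pvRuns]
  | cons r rs ih =>
    by_cases h : r = p + 1
    · have h' : ¬ p ≠ r - 1 := by omega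
      simpa [pvStartsTail, pvEndsTail, pvRuns, h, h', List.zip] using ih r a
    · have h' : p ≠ r - 1 := by omega
      simpa [pvStartsTail, pvEndsTail, pvRuns, h, h', List.zip] using ih r r

theorem ranges_eq (r0 : Int) (rs : List Int) :
    (pvStarts (r0 :: rs)).zip (pvEnds (r0 :: rs)) =
      (let st := rs.foldl
        (fun (acc : List (Int × Int) × Int × Int) r =>
          if r = acc.2.2 + 1 then (acc.1, acc.2.1, r)
          else (acc.1 ++ [(acc.2.1, acc.2.2)], r, r))
        ([], r0, r0)
       st.1 ++ [(st.2.1, st.2.2)]) := by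
  rw [foldA_eq_runs, pvStarts_cons, pvEnds_cons, zip_tails_eq_runs]
  simp

-- ===== VERDICT (by name: the statement is the Claim_ definition above) =====
theorem rows_to_ranges_py_spec : Claim_equal_rows_to_ranges_py := by
  intro rows max_ranges _
  unfold Spec_rows_to_ranges_py rows_to_ranges_py rows_to_ranges_py_alt
  cases h : PySem.List.sorted (PySem.Set.ofList rows) (fun x => x) false with
  | nil => rfl
  | cons r0 rest => simp only [← ranges_eq r0 rest]
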